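-- pv_equiv track=rewrite | github.com/jamil-said/code-samples | Python_code_challenges/gameBoardLights.py | boardLights
-- ===== SOURCE A (Python) =====
-- def boardLights(states, s):
--     newStates = [0] * len(states)
--     while s > 0:
--         for i in range(1, len(states)-1):
--             if states[i-1] == 0 and states[i+1] == 0 or states[i-1] == 1 \
--             and states[i+1] == 1:
--                 newStates[i] = 0
--             else:
--                 newStates[i] = 1
--         if states[1] == 1: newStates[0] = 1
--         else: newStates[0] = 0
--         if states[-2] == 1: newStates[-1] = 1
--         else: newStates[-1] = 0
--         states = newStates[:]
--         s -= 1
--     return states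
-- ===== SOURCE B (Python) =====
-- def boardLights(states, s):
--     n = len(states)
--     if s <= 0:
--         return states
--     # First step applies the board rule directly (cells may hold arbitrary ints).
--     first = [1 if states[1] == 1 else 0]
--     for i in range(1, n - 1):
--         pair = (states[i - 1], states[i + 1])
--         first.append(0 if pair == (0, 0) or pair == (1, 1) else 1)
--     first.append(1 if states[n - 2] == 1 else 0)
--     # Now every cell is 0/1: pack the board into one integer bitmask and do each
--     # remaining step as two shifts and a xor on the whole board at once.
--     m = 0
--     for b in reversed(first):
--         m = 2 * m + b
--     mask = (1 << n) - 1
--     for _ in range(s - 1):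
--         m = ((m << 1) ^ (m >> 1)) & mask
--     return [(m >> i) & 1 for i in range(n)]
-- ===== Notes on version B (the rewrite author's own statement) =====
-- stated objective: faster
-- what changed: B does the first step once on the list (cells may hold arbitrary ints), then packs the 0/1 board into a single integer bitmask and performs every remaining step as two whole-board shifts and a xor instead of A's per-cell inner loop with list copying.
import Mathlib
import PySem

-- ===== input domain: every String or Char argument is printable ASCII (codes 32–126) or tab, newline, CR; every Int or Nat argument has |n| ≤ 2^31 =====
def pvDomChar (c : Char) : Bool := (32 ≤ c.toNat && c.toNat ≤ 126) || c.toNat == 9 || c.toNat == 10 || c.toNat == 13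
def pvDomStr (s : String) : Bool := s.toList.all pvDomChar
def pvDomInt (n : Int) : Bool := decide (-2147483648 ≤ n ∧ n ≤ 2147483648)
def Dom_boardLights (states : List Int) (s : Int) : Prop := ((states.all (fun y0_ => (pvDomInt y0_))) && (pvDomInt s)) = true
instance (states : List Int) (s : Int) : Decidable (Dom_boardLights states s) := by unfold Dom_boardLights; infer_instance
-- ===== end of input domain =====

-- B replaces the per-cell inner loop of every step after the first by whole-board
-- bit operations on one packed integer (the rule is left XOR right with zero
-- boundaries once all cells are 0/1); objective: faster by a constant factor.

-- ===== PORT A =====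
-- one iteration of the while body: newStates = [0]*n, interior loop, the two
-- boundary assignments, then states = newStates[:]
-- (indices i-1, i+1, 1 and -2 are in range under Pre_, so pyGetD is exact here)
def boardLightsStep (states : List Int) : List Int :=
  let n := states.length
  let mid := (PySem.List.pyRange 1 ((n : Int) - 1) 1).foldl (fun ns i =>
      ns.set i.toNat
        (if (PySem.List.pyGetD states (i - 1) 0 = 0 ∧ PySem.List.pyGetD states (i + 1) 0 = 0) ∨
            (PySem.List.pyGetD states (i - 1) 0 = 1 ∧ PySem.List.pyGetD states (i + 1) 0 = 1)
         then 0 else 1)) (List.replicate n 0)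
  let w0 := mid.set 0 (if PySem.List.pyGetD states 1 0 = 1 then 1 else 0)
  w0.set (n - 1) (if PySem.List.pyGetD states (-2) 0 = 1 then 1 else 0)

-- 'while s > 0: … s -= 1' runs exactly max(s,0) times
def boardLightsLoop : Nat → List Int → List Int
  | 0, st => st
  | k + 1, st => boardLightsLoop k (boardLightsStep st)

def boardLights (states : List Int) (s : Int) : List Int :=
  boardLightsLoop s.toNat states

-- ===== PORT B =====
-- literal transliteration of Source B; the packed board is a nonnegative Python int,
-- so Nat is exact for it (cells are 0/1 when packed, hence .toNat is exact)
def boardLights_alt (states : List Int) (s : Int) : List Int :=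
  let n := states.length
  if s ≤ 0 then states
  else
    let first0 : List Int := [if PySem.List.pyGetD states 1 0 = 1 then 1 else 0]
    let first1 := (PySem.List.pyRange 1 ((n : Int) - 1) 1).foldl (fun acc i =>
        acc ++ [if (PySem.List.pyGetD states (i - 1) 0, PySem.List.pyGetD states (i + 1) 0) = ((0 : Int), (0 : Int)) ∨
                   (PySem.List.pyGetD states (i - 1) 0, PySem.List.pyGetD states (i + 1) 0) = ((1 : Int), (1 : Int))
                then (0 : Int) else 1]) first0
    let first := first1 ++ [if PySem.List.pyGetD states ((n : Int) - 2) 0 = 1 then 1 else 0]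
    let m0 : Nat := first.reverse.foldl (fun m b => 2 * m + b.toNat) 0
    let mask : Nat := (1 <<< n) - 1
    let mf := (List.range (s.toNat - 1)).foldl (fun m _ => ((m <<< 1) ^^^ (m >>> 1)) &&& mask) m0
    (List.range n).map (fun i => (((mf >>> i) &&& 1 : Nat) : Int))

-- ===== PRECONDITION & SPEC =====
-- A raises IndexError (states[1]) when s > 0 and the board has fewer than 2 cells
def Pre_boardLights (states : List Int) (s : Int) : Prop := s ≤ 0 ∨ 2 ≤ states.length
instance (states : List Int) (s : Int) : Decidable (Pre_boardLights states s) := by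
  unfold Pre_boardLights; infer_instance
def pvWitness_boardLights : List Int × Int := ([1, 0, 1, 1], 3)

def Spec_boardLights (states : List Int) (s : Int) (out : List Int) : Prop := out = boardLights_alt states s
instance (states : List Int) (s : Int) (out : List Int) : Decidable (Spec_boardLights states s out) := by unfold Spec_boardLights; infer_instance

-- ===== CLAIM (what is proved, stated in full; the proofs are below) =====
def Claim_equal_boardLights : Prop := ∀ (states : List Int) (s : Int), Dom_boardLights states s → Pre_boardLights states s → Spec_boardLights states s (boardLights states s)

-- ===== LEMMAS AND PROOFS =====

-- reference semantics: cell lookup with zero boundary, the XOR rule, the generic first step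
def gz (bs : List Int) (i : Int) : Int := if 0 ≤ i then bs.getD i.toNat 0 else 0

def x2 (a b : Int) : Int := if a = b then 0 else 1

def rstep (bs : List Int) : List Int :=
  (List.range bs.length).map (fun (j : Nat) => x2 (gz bs ((j : Int) - 1)) (gz bs ((j : Int) + 1)))

def g2 (bs : List Int) (j : Nat) : Int :=
  if j = 0 then (if gz bs 1 = 1 then 1 else 0)
  else if j = bs.length - 1 then (if gz bs ((bs.length : Int) - 2) = 1 then 1 else 0)
  else if (gz bs ((j : Int) - 1) = 0 ∧ gz bs ((j : Int) + 1) = 0) ∨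
          (gz bs ((j : Int) - 1) = 1 ∧ gz bs ((j : Int) + 1) = 1) then 0 else 1

def rstepG (bs : List Int) : List Int := (List.range bs.length).map (g2 bs)

def Bits (bs : List Int) : Prop := ∀ x ∈ bs, x = 0 ∨ x = 1

def packR (bs : List Int) : Nat := bs.foldr (fun b m => 2 * m + b.toNat) 0

def mstep (n : Nat) (m : Nat) : Nat := ((m <<< 1) ^^^ (m >>> 1)) &&& ((1 <<< n) - 1)

theorem pyGetD_gz (xs : List Int) (i : Int) (h : 0 ≤ i) :
    PySem.List.pyGetD xs i 0 = gz xs i := by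
  unfold gz
  rw [if_pos h]
  simp only [PySem.List.pyGetD, PySem.List.pyGet?, PySem.List.pyIdx?, h, if_pos, List.getD]
  split
  · simp
  · rename_i hlt
    rw [List.getElem?_eq_none (by omega)]
    simp

theorem getElem?_set' (l : List Int) (i j : Nat) (a : Int) :
    (l.set i a)[j]? = if i = j then (if j < l.length then some a else none) else l[j]? := by
  rw [List.getElem?_set]
  split
  · subst j; split <;> simp_all
  · rfl

theorem foldl_set_length (l : List Int) (f : Int → Int) (init : List Int) :
    (l.foldl (fun ns i => ns.set i.toNat (f i)) init).length = init.length := by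
  induction l generalizing init with
  | nil => rfl
  | cons x t ih => simp [List.foldl, ih]

theorem foldl_set_getElem? (l : List Int) (f : Int → Int) (init : List Int) (j : Nat)
    (hpos : ∀ i ∈ l, 0 ≤ i) :
    (l.foldl (fun ns i => ns.set i.toNat (f i)) init)[j]? =
      if (j : Int) ∈ l then (if j < init.length then some (f j) else none) else init[j]? := by
  induction l generalizing init with
  | nil => simp
  | cons x t ih =>
    simp only [List.foldl]
    rw [ih _ (fun i hi => hpos i (List.mem_cons_of_mem _ hi))]
    by_cases hjt : (j : Int) ∈ t
    · simp [hjt, List.mem_cons]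
    · rw [if_neg hjt, getElem?_set']
      have hx0 : 0 ≤ x := hpos x (List.mem_cons_self)
      by_cases hxj : x.toNat = j
      · have hx : x = (j : Int) := by omega
        subst hx
        simp [List.mem_cons]
      · have hx : ¬ ((j : Int) = x) := by omega
        simp [List.mem_cons, hx, hjt, if_neg hxj]

theorem stepA_eq_rstepG (states : List Int) (h : 2 ≤ states.length) :
    boardLightsStep states = rstepG states := by
  unfold boardLightsStep rstepG
  apply List.ext_getElem?
  intro j
  have hlen : (List.replicate states.length (0 : Int)).length = states.length := by simp
  have hmem : ∀ i ∈ PySem.List.pyRange 1 ((states.length : Int) - 1) 1, (0 : Int) ≤ i := by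
    intro i hi
    have := (PySem.List.mem_pyRange_one).1 hi
    omega
  rw [List.getElem?_map, getElem?_set', getElem?_set', foldl_set_getElem? _ _ _ _ hmem]
  simp only [List.length_set, foldl_set_length, hlen]
  by_cases hj : j < states.length
  · rw [List.getElem?_range hj]
    by_cases hjl : j = states.length - 1
    · rw [if_pos hjl.symm, if_pos (by omega)]
      have h2' : PySem.List.pyGetD states (-2) 0 = gz states ((states.length : Int) - 2) := by
        rw [PySem.List.pyGetD_neg_ofNat states 2 0 (by omega) (by omega)]
        unfold gz
        rw [if_pos (by omega)]
        rw [List.getD_eq_getElem?_getD, List.getElem?_eq_getElem (by omega)]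
        simp only [Option.getD_some]
        congr 1
        omega
      rw [h2']
      unfold g2
      have hj0 : ¬ (j = 0) := by omega
      simp [hjl]
      intro h'
      exact absurd h' (by omega)
    · by_cases hj0 : j = 0
      · subst hj0
        rw [if_neg (by omega), if_pos rfl, if_pos (by omega)]
        rw [pyGetD_gz _ _ (by omega)]
        unfold g2
        simp
      · -- interior
        rw [if_neg (by omega), if_neg (by omega)]
        have hmemj : (j : Int) ∈ PySem.List.pyRange 1 ((states.length : Int) - 1) 1 := by
          rw [PySem.List.mem_pyRange_one]
          omega
        rw [if_pos hmemj, if_pos hj]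
        rw [pyGetD_gz _ _ (by omega), pyGetD_gz _ _ (by omega)]
        unfold g2
        simp [hj0, hjl]
  · have hnm : ¬ ((j : Int) ∈ PySem.List.pyRange 1 ((states.length : Int) - 1) 1) := by
      rw [PySem.List.mem_pyRange_one]; omega
    rw [if_neg hnm, if_neg (by omega : ¬ (states.length - 1 = j)), if_neg (by omega : ¬ ((0:Nat) = j))]
    rw [List.getElem?_eq_none (by simpa using hj), List.getElem?_eq_none (by simp; omega)]
    simp

theorem length_rstepG (bs : List Int) : (rstepG bs).length = bs.length := by simp [rstepG]

theorem length_rstep (bs : List Int) : (rstep bs).length = bs.length := by simp [rstep]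

theorem bits_rstepG (bs : List Int) : Bits (rstepG bs) := by
  intro x hx
  simp only [rstepG, List.mem_map] at hx
  obtain ⟨j, -, rfl⟩ := hx
  unfold g2
  split <;> [skip; split] <;> split <;> simp

theorem bits_rstep (bs : List Int) : Bits (rstep bs) := by
  intro x hx
  simp only [rstep, List.mem_map] at hx
  obtain ⟨j, -, rfl⟩ := hx
  unfold x2
  split <;> simp

theorem gz_bits (bs : List Int) (hb : Bits bs) (i : Int) : gz bs i = 0 ∨ gz bs i = 1 := by
  unfold gz
  split
  · rw [List.getD_eq_getElem?_getD]
    rcases h : bs[i.toNat]? with _ | v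
    · simp
    · simpa using hb v (List.mem_of_getElem? h)
  · simp

theorem rstepG_eq_rstep (bs : List Int) (hb : Bits bs) (h2 : 2 ≤ bs.length) :
    rstepG bs = rstep bs := by
  unfold rstepG rstep
  refine List.map_congr_left fun j hj => ?_
  rw [List.mem_range] at hj
  unfold g2 x2
  by_cases hj0 : j = 0
  · subst hj0
    have hneg : gz bs (-1) = 0 := by unfold gz; rw [if_neg (by omega)]
    rw [if_pos rfl]
    push_cast
    rw [hneg]
    rcases gz_bits bs hb 1 with h | h <;> simp [h]
  · by_cases hjl : j = bs.length - 1
    · rw [if_neg hj0, if_pos hjl]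
      have hout : gz bs ((j : Int) + 1) = 0 := by
        unfold gz
        rw [if_pos (by omega)]
        rw [List.getD_eq_getElem?_getD, List.getElem?_eq_none (by omega)]
        simp
      have hsame : ((bs.length : Int) - 2) = (j : Int) - 1 := by omega
      rw [hsame, hout]
      rcases gz_bits bs hb ((j : Int) - 1) with h | h <;> simp [h]
    · rw [if_neg hj0, if_neg hjl]
      rcases gz_bits bs hb ((j : Int) - 1) with h | h <;>
        rcases gz_bits bs hb ((j : Int) + 1) with h' | h' <;>
        simp [h, h']

-- A's loop on a board of 0/1 cells is the iterated XOR step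
theorem loopA_eq_iterate (k : Nat) (bs : List Int) (hb : Bits bs) (h2 : 2 ≤ bs.length) :
    boardLightsLoop k bs = rstep^[k] bs := by
  induction k generalizing bs with
  | zero => rfl
  | succ k ih =>
    rw [boardLightsLoop, Function.iterate_succ_apply]
    rw [stepA_eq_rstepG bs h2, rstepG_eq_rstep bs hb h2]
    exact ih (rstep bs) (bits_rstep bs) (by rw [length_rstep]; exact h2)

-- bit-level characterisation of packR
theorem testBit_packR (bs : List Int) (hb : Bits bs) (j : Nat) :
    (packR bs).testBit j = decide (bs.getD j 0 = 1) := by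
  induction bs generalizing j with
  | nil => simp [packR]
  | cons b t ih =>
    have hbt : b = 0 ∨ b = 1 := hb b List.mem_cons_self
    have hbn : b.toNat < 2 := by rcases hbt with h | h <;> simp [h]
    cases j with
    | zero =>
      rw [packR, List.foldr]
      show (2 * (packR t) + b.toNat).testBit 0 = decide ((b :: t).getD 0 0 = 1)
      rw [Nat.testBit_zero]
      rcases hbt with h | h <;> subst h <;> simp [Nat.mul_mod_right]
    | succ j =>
      rw [packR, List.foldr]
      show (2 * (packR t) + b.toNat).testBit (j + 1) = decide ((b :: t).getD (j+1) 0 = 1)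
      rw [Nat.testBit_add_one]
      have : (2 * (packR t) + b.toNat) / 2 = packR t := by omega
      rw [this]
      rw [ih (fun x hx => hb x (List.mem_cons_of_mem _ hx)), List.getD_cons_succ]

theorem gz_natCast (bs : List Int) (j : Nat) : gz bs (j : Int) = bs.getD j 0 := by
  unfold gz
  rw [if_pos (by omega)]
  simp

-- packed step = XOR step
theorem mstep_packR (bs : List Int) (hb : Bits bs) :
    mstep bs.length (packR bs) = packR (rstep bs) := by
  apply Nat.eq_of_testBit_eq
  intro j
  rw [testBit_packR _ (bits_rstep bs)]
  unfold mstep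
  have hmask : (1 <<< bs.length) - 1 = 2 ^ bs.length - 1 := by
    rw [Nat.shiftLeft_eq, one_mul]
  rw [hmask, Nat.testBit_and, Nat.testBit_xor, Nat.testBit_shiftLeft, Nat.testBit_shiftRight,
    Nat.testBit_two_pow_sub_one]
  by_cases hj : j < bs.length
  · have hr : (rstep bs).getD j 0 = x2 (gz bs ((j : Int) - 1)) (gz bs ((j : Int) + 1)) := by
      unfold rstep
      rw [List.getD_eq_getElem?_getD, List.getElem?_map, List.getElem?_range hj]
      simp
    rw [hr]
    have hright : (packR bs).testBit (1 + j) = decide (gz bs ((j : Int) + 1) = 1) := by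
      have hc : ((j : Int) + 1) = ((j + 1 : Nat) : Int) := by push_cast; ring
      rw [Nat.add_comm 1 j, testBit_packR _ hb, hc, gz_natCast]
    rw [hright]
    by_cases hj0 : j = 0
    · subst hj0
      have hneg : gz bs (-1) = 0 := by unfold gz; rw [if_neg (by omega)]
      push_cast
      rw [hneg]
      rcases gz_bits bs hb 1 with h | h <;> simp [h, x2, hj]
    · have h1j : (1 : Nat) ≤ j := by omega
      have hleft : (packR bs).testBit (j - 1) = decide (gz bs ((j : Int) - 1) = 1) := by
        rw [testBit_packR _ hb]
        have : ((j : Int) - 1) = ((j - 1 : Nat) : Int) := by omega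
        rw [this, gz_natCast]
      simp only [h1j, decide_true, Bool.true_and, hleft]
      rcases gz_bits bs hb ((j : Int) - 1) with h | h <;>
        rcases gz_bits bs hb ((j : Int) + 1) with h' | h' <;>
        simp [h, h', x2, hj]
  · have hnone : (rstep bs)[j]? = none := List.getElem?_eq_none (by rw [length_rstep]; omega)
    simp [List.getD_eq_getElem?_getD, hnone, hj]

-- unpacking inverts packing
theorem unpack_packR (bs : List Int) (hb : Bits bs) :
    (List.range bs.length).map (fun i => (((packR bs >>> i) &&& 1 : Nat) : Int)) = bs := by
  apply List.ext_getElem (by simp)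
  intro j hj hj'
  simp only [List.getElem_map, List.getElem_range]
  have hv : (packR bs >>> j) &&& 1 = if (packR bs).testBit j then 1 else 0 := by
    rw [Nat.and_one_is_mod]
    rcases hbit : (packR bs).testBit j with _ | _ <;>
      simp [Nat.testBit] at hbit <;> simp <;> omega
  have hget : bs.getD j 0 = bs[j] := by
    rw [List.getD_eq_getElem?_getD, List.getElem?_eq_getElem hj']
    rfl
  rw [hv, testBit_packR _ hb, hget]
  rcases hb bs[j] (bs.getElem_mem hj') with h | h <;> simp [h]

theorem foldl_range_const {α : Type} (g : α → α) (k : Nat) (a : α) :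
    (List.range k).foldl (fun m _ => g m) a = g^[k] a := by
  induction k with
  | zero => rfl
  | succ k ih => rw [List.range_succ, List.foldl_append, Function.iterate_succ_apply', ih]; rfl

-- the packed loop tracks the XOR step exactly
theorem mstep_iterate (k : Nat) (n : Nat) (bs : List Int) (hb : Bits bs) (hn : bs.length = n) :
    (List.range n).map (fun i => ((((mstep n)^[k] (packR bs) >>> i) &&& 1 : Nat) : Int)) =
      rstep^[k] bs := by
  induction k generalizing bs with
  | zero =>
    subst hn
    exact unpack_packR bs hb
  | succ k ih =>
    rw [Function.iterate_succ_apply, Function.iterate_succ_apply]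
    have : mstep n (packR bs) = packR (rstep bs) := by rw [← hn]; exact mstep_packR bs hb
    rw [this]
    exact ih (rstep bs) (bits_rstep bs) (by rw [length_rstep, hn])

-- B's first list is A's generic step
theorem first_eq_rstepG (states : List Int) (h2 : 2 ≤ states.length) :
    ((PySem.List.pyRange 1 ((states.length : Int) - 1) 1).foldl (fun acc i =>
        acc ++ [if (PySem.List.pyGetD states (i - 1) 0, PySem.List.pyGetD states (i + 1) 0) = ((0 : Int), (0 : Int)) ∨
                   (PySem.List.pyGetD states (i - 1) 0, PySem.List.pyGetD states (i + 1) 0) = ((1 : Int), (1 : Int))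
                then (0 : Int) else 1])
        [if PySem.List.pyGetD states 1 0 = 1 then 1 else 0]) ++
      [if PySem.List.pyGetD states ((states.length : Int) - 2) 0 = 1 then 1 else 0] =
    rstepG states := by
  rw [PySem.List.foldl_append_singleton_eq_map]
  unfold rstepG
  apply List.ext_getElem?
  intro j
  have hlenr : ((states.length : Int) - 1 - 1).toNat = states.length - 2 := by omega
  by_cases hj : j < states.length
  · rw [List.getElem?_map, List.getElem?_range hj, Option.map_some]
    by_cases hj0 : j = 0
    · subst hj0
      rw [List.getElem?_append_left (by simp)]
      rw [List.getElem?_append_left (by simp), List.getElem?_cons_zero]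
      rw [pyGetD_gz _ _ (by omega)]
      unfold g2
      simp
    · by_cases hjl : j = states.length - 1
      · have hlen1 : ([if PySem.List.pyGetD states 1 0 = 1 then (1:Int) else 0] ++
            (PySem.List.pyRange 1 ((states.length : Int) - 1) 1).map (fun i =>
              if (PySem.List.pyGetD states (i - 1) 0, PySem.List.pyGetD states (i + 1) 0) = ((0 : Int), (0 : Int)) ∨
                 (PySem.List.pyGetD states (i - 1) 0, PySem.List.pyGetD states (i + 1) 0) = ((1 : Int), (1 : Int))
              then (0 : Int) else 1)).length = states.length - 1 := by
          simp [PySem.List.length_pyRange_one]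
          omega
        rw [List.getElem?_append_right (by rw [hlen1]; omega)]
        rw [hlen1, hjl]
        have h2' : PySem.List.pyGetD states ((states.length : Int) - 2) 0 = gz states ((states.length : Int) - 2) :=
          pyGetD_gz _ _ (by omega)
        rw [Nat.sub_self, List.getElem?_cons_zero, h2']
        unfold g2
        simp
        intro h'
        exact absurd h' (by omega)
      · -- interior: 1 ≤ j ≤ n-2
        rw [List.getElem?_append_left (by simp [PySem.List.length_pyRange_one]; omega)]
        rw [List.getElem?_append_right (by simp; omega)]
        simp only [List.length_cons, List.length_nil]
        rw [PySem.List.pyRange_one, List.getElem?_map, List.getElem?_map]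
        rw [List.getElem?_range (show j - 1 < ((states.length : Int) - 1 - 1).toNat by rw [hlenr]; omega)]
        simp only [Option.map_some]
        have hcast : (1 : Int) + ((j - 1 : Nat) : Int) = (j : Int) := by omega
        rw [hcast, pyGetD_gz _ _ (by omega), pyGetD_gz _ _ (by omega)]
        unfold g2
        simp only [hj0, hjl, if_false]
        rcases gz states ((j : Int) - 1) with _ | _ <;> simp [Prod.ext_iff]
  · rw [List.getElem?_eq_none (by simp [PySem.List.length_pyRange_one]; omega),
        List.getElem?_eq_none (by simp; omega)]

-- B's reversed-Horner packing is packR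
theorem pack_fold_eq_packR (bs : List Int) :
    bs.reverse.foldl (fun m b => 2 * m + b.toNat) 0 = packR bs := by
  rw [List.foldl_reverse]
  rfl

-- ===== VERDICT (by name: the statement is the Claim_ definition above) =====
theorem boardLights_spec : Claim_equal_boardLights := by
  intro states s _ hpre
  unfold Spec_boardLights boardLights boardLights_alt
  by_cases hs : s ≤ 0
  · have : s.toNat = 0 := by omega
    rw [this, if_pos hs]
    rfl
  · rw [if_neg hs]
    have h2 : 2 ≤ states.length := by
      rcases hpre with h | h
      · exact absurd h hs
      · exact h
    obtain ⟨k, hk⟩ : ∃ k, s.toNat = k + 1 := ⟨s.toNat - 1, by omega⟩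
    rw [hk]
    simp only [Nat.add_sub_cancel]
    show boardLightsLoop k (boardLightsStep states) = _
    rw [stepA_eq_rstepG states h2]
    rw [loopA_eq_iterate _ _ (bits_rstepG states) (by rw [length_rstepG]; exact h2)]
    simp only [first_eq_rstepG states h2, pack_fold_eq_packR]
    rw [foldl_range_const]
    exact (mstep_iterate k states.length (rstepG states) (bits_rstepG states) (length_rstepG states)).symm
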